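-- pv_equiv track=rewrite | github.com/sidb95/code-problems | hackerrank/practice/priyanka-and-toys.py | toys
-- ===== SOURCE A (Python) =====
-- def toys(w):
--     w = sorted(w)
--     i = 0
--     n = len(w)
--     count = 0
--     #
--     while (i < n):
--         num1 = w[i] + 4
--         while ((i < n) and w[i] <= num1):
--             i += 1
--         count += 1
--     #
--     return count
-- ===== SOURCE B (Python) =====
-- def toys(w):
--     # Repeated selection: no sorting. Each container is anchored at the current
--     # minimum; discard everything within its width and recurse on the rest.
--     remaining = list(w)
--     count = 0
--     while remaining:
--         cutoff = min(remaining) + 4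
--         remaining = [x for x in remaining if x > cutoff]
--         count += 1
--     return count
-- ===== Notes on version B (the rewrite author's own statement) =====
-- stated objective: alternative
-- what changed: Replaced A's sort followed by a nested-while index sweep with a sort-free repeated-selection loop: each round takes min() of the remaining multiset, filters out every weight within min+4, and counts one container.
import Mathlib
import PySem

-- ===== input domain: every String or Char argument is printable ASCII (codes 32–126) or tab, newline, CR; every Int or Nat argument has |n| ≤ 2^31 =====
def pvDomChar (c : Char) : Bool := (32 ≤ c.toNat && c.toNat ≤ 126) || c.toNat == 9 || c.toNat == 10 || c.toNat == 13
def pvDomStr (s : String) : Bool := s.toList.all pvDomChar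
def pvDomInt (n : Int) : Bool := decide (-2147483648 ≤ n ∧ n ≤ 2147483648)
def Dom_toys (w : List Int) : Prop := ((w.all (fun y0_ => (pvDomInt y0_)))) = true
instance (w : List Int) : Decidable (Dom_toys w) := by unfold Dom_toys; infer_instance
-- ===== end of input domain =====

-- B replaces A's sort-then-sweep (nested whiles over an index) by a sort-free
-- repeated-selection loop: take min of the remaining multiset, filter out all
-- weights ≤ min+4, count one container, repeat (alternative decomposition).

-- ===== PORT A =====
-- inner while loop of A: advance i while w[i] <= num1 (modelled as consuming the list prefix)
def toysInner (num1 : Int) : List Int → List Int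
  | [] => []
  | x :: xs => if x ≤ num1 then toysInner num1 xs else x :: xs

theorem toysInner_length_le (num1 : Int) (l : List Int) :
    (toysInner num1 l).length ≤ l.length := by
  induction l with
  | nil => simp [toysInner]
  | cons x xs ih =>
    simp only [toysInner]
    split
    · exact Nat.le_succ_of_le ih
    · exact Nat.le_refl _

-- outer while loop of A: one iteration starts a group at the current element
def toysOuter : List Int → Int
  | [] => 0
  | x :: xs => toysOuter (toysInner (x + 4) xs) + 1
termination_by l => l.length
decreasing_by
  exact Nat.lt_succ_of_le (toysInner_length_le (x + 4) xs)

def toys (w : List Int) : Int :=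
  toysOuter (PySem.List.sorted w (fun y => y) false)

-- ===== PORT B =====
-- a list loses an element it contains on which the filter predicate fails
theorem filter_length_lt {l : List Int} {p : Int → Bool} {x : Int}
    (hx : x ∈ l) (hp : p x = false) : (l.filter p).length < l.length := by
  induction l with
  | nil => cases hx
  | cons a as ih =>
    rcases List.mem_cons.mp hx with rfl | hmem
    · simp only [List.filter_cons, hp]
      exact Nat.lt_succ_of_le (List.length_filter_le p as)
    · simp only [List.filter_cons]
      split
      · exact Nat.succ_lt_succ (ih hmem)
      · exact Nat.lt_succ_of_lt (ih hmem)

-- while remaining: cutoff = min(remaining) + 4; remaining = [x > cutoff]; count += 1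
def toysAltLoop : List Int → Int
  | [] => 0
  | a :: as =>
    -- min(remaining) on a nonempty list never yields none; getD 0 is never used
    let m := (PySem.List.min? (a :: as) (fun y => y)).getD 0
    toysAltLoop ((a :: as).filter (fun y => decide (m + 4 < y))) + 1
termination_by l => l.length
decreasing_by
  refine filter_length_lt (x := (PySem.List.min? (a :: as) (fun y => y)).getD 0) ?_ ?_
  · have := PySem.List.min?_mem (xs := a :: as) (key := fun y => y) (m := (PySem.List.min? (a :: as) (fun y => y)).getD 0) ?_
    · exact this
    · rw [PySem.List.min?_id_cons]; rfl
  · simp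

def toys_alt (w : List Int) : Int := toysAltLoop w

-- ===== PRECONDITION & SPEC =====
def Spec_toys (w : List Int) (out : Int) : Prop := out = toys_alt w
instance (w : List Int) (out : Int) : Decidable (Spec_toys w out) := by unfold Spec_toys; infer_instance

-- ===== CLAIM (what is proved, stated in full; the proofs are below) =====
def Claim_equal_toys : Prop := ∀ (w : List Int), Dom_toys w → Spec_toys w (toys w)

-- ===== LEMMAS AND PROOFS =====

-- On an ascending list, A's inner while-skip is exactly B's strict filter.
theorem toysInner_eq_filter (c : Int) (l : List Int)
    (hl : l.Pairwise (fun a b => a ≤ b)) :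
    toysInner c l = l.filter (fun y => decide (c < y)) := by
  induction l with
  | nil => rfl
  | cons x xs ih =>
    rcases List.pairwise_cons.mp hl with ⟨hx, hxs⟩
    by_cases h : x ≤ c
    · simp only [toysInner, if_pos h, List.filter_cons,
        decide_eq_true_eq, not_lt.mpr h]
      rw [ih hxs]
      simp
    · have hc : c < x := not_le.mp h
      simp only [toysInner, if_neg h, List.filter_cons, decide_eq_true_eq, hc,
        if_pos]
      have : xs.filter (fun y => decide (c < y)) = xs := by
        apply List.filter_eq_self.mpr
        intro y hy
        exact decide_eq_true (lt_of_lt_of_le hc (hx y hy))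
      rw [this]

-- filtering commutes with Python's stable sort (identity key)
theorem filter_sorted_comm (w : List Int) (p : Int → Bool) :
    (PySem.List.sorted w (fun y => y) false).filter p =
      PySem.List.sorted (w.filter p) (fun y => y) false := by
  symm
  apply PySem.List.sorted_id_eq_of_perm_of_pairwise
  · exact (PySem.List.sorted_perm w (fun y => y) false).filter p
  · exact (PySem.List.sorted_pairwise w (fun y => y)).filter p

-- the head of the sorted list is the value of min(w)
theorem head_sorted_eq_min (a : Int) (as : List Int) (m : Int) (t : List Int)
    (hs : PySem.List.sorted (a :: as) (fun y => y) false = m :: t) :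
    (PySem.List.min? (a :: as) (fun y => y)).getD 0 = m := by
  have hsome : PySem.List.min? (a :: as) (fun y => y) =
      some ((PySem.List.min? (a :: as) (fun y => y)).getD 0) := by
    rw [PySem.List.min?_id_cons]; rfl
  have hμmem : (PySem.List.min? (a :: as) (fun y => y)).getD 0 ∈ (a :: as) :=
    PySem.List.min?_mem hsome
  have hμmin : ∀ y ∈ (a :: as), (PySem.List.min? (a :: as) (fun y => y)).getD 0 ≤ y :=
    PySem.List.min?_isMin hsome
  have hmmem : m ∈ (a :: as) := by
    have : m ∈ PySem.List.sorted (a :: as) (fun y => y) false := by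
      rw [hs]; exact List.mem_cons_self
    exact (PySem.List.mem_sorted _ _ _ _).mp this
  have hmmin : m ≤ (PySem.List.min? (a :: as) (fun y => y)).getD 0 :=
    PySem.List.key_head_sorted_le (a :: as) (fun y => y) hs _ hμmem
  exact le_antisymm (hμmin m hmmem) hmmin

-- main equivalence, by strong induction on the length
theorem outer_sorted_eq_altLoop : ∀ (n : Nat) (w : List Int), w.length ≤ n →
    toysOuter (PySem.List.sorted w (fun y => y) false) = toysAltLoop w := by
  intro n
  induction n with
  | zero =>
    intro w hw
    have : w = [] := List.length_eq_zero_iff.mp (Nat.le_zero.mp hw)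
    subst this
    rw [show PySem.List.sorted ([] : List Int) (fun y => y) false = [] from rfl,
      toysOuter, toysAltLoop]
  | succ k ih =>
    intro w hw
    cases hw' : w with
    | nil =>
      subst hw'
      rw [show PySem.List.sorted ([] : List Int) (fun y => y) false = [] from rfl,
        toysOuter, toysAltLoop]
    | cons a as =>
      subst hw'
      obtain ⟨m, t, hs⟩ : ∃ m t, PySem.List.sorted (a :: as) (fun y => y) false = m :: t := by
        cases h : PySem.List.sorted (a :: as) (fun y => y) false with
        | nil => exact absurd ((PySem.List.sorted_eq_nil_iff (a :: as) (fun y => y) false).mp h) (by simp)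
        | cons m t => exact ⟨m, t, rfl⟩
      have hμ : (PySem.List.min? (a :: as) (fun y => y)).getD 0 = m :=
        head_sorted_eq_min a as m t hs
      -- unfold B one step
      simp only [toysAltLoop]
      rw [hμ]
      -- unfold A one step
      rw [hs, toysOuter]
      congr 1
      -- the tail t is ascending
      have ht : t.Pairwise (fun x y => x ≤ y) := by
        have := PySem.List.sorted_pairwise (a :: as) (fun y => y)
        rw [hs] at this
        exact (List.pairwise_cons.mp this).2
      rw [toysInner_eq_filter (m + 4) t ht]
      -- t.filter = (m :: t).filter since ¬ m+4 < m
      have hmt : (m :: t).filter (fun y => decide (m + 4 < y)) =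
          t.filter (fun y => decide (m + 4 < y)) := by
        simp
      rw [← hmt, ← hs, filter_sorted_comm]
      -- apply IH to the strictly shorter filtered list
      apply ih
      have hlt : ((a :: as).filter (fun y => decide (m + 4 < y))).length <
          (a :: as).length := by
        apply filter_length_lt (x := m)
        · exact hμ ▸ PySem.List.min?_mem (by rw [PySem.List.min?_id_cons]; rfl)
        · simp
      omega

-- ===== VERDICT (by name: the statement is the Claim_ definition above) =====
theorem toys_spec : Claim_equal_toys := by
  intro w _
  unfold Spec_toys toys toys_alt
  exact outer_sorted_eq_altLoop w.length w (Nat.le_refl _)
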